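-- pv_equiv track=rewrite | github.com/herr-schmidt/interventional-radiology-june | src/data_maker.py | create_room_specialty_assignment
-- ===== SOURCE A (Python) =====
-- def create_room_specialty_assignment(J, K, T):
--     dict = {}
--     for j in range(0, J):
--         for k in range(0, K):
--             for t in range(0, T):
--                 if((j + 1 == 1 and (k + 1 == 1 or k + 1 == 2)) or (j + 1 == 2 and (k + 1 == 3 or k + 1 == 4))):
--                     dict[(j + 1, k + 1, t + 1)] = 1
--                 else:
--                     dict[(j + 1, k + 1, t + 1)] = 0
--     return dict
-- ===== SOURCE B (Python) =====
-- ASSIGNED_PAIRS = [(1, 1), (1, 2), (2, 3), (2, 4)]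
--
-- def create_room_specialty_assignment(J, K, T):
--     # Default-fill every (j, k, t) cell with 0, then overwrite the fixed
--     # assigned (room, specialty) pairs with 1 — no per-cell conditional.
--     d = {}
--     for j in range(J):
--         for k in range(K):
--             for t in range(T):
--                 d[(j + 1, k + 1, t + 1)] = 0
--     active = [(j, k) for (j, k) in ASSIGNED_PAIRS if j <= J and k <= K]
--     if active:
--         for t in range(1, T + 1):
--             for (j, k) in active:
--                 d[(j, k, t)] = 1
--     return d
-- ===== Notes on version B (the rewrite author's own statement) =====
-- stated objective: simpler
-- what changed: Instead of A's per-cell conditional inside the triple j,k,t loop, B default-fills every grid cell with 0 and then runs a second, differently-shaped pass over t and the fixed list of four assigned (room, specialty) pairs, overwriting exactly those keys with 1.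
import Mathlib
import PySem

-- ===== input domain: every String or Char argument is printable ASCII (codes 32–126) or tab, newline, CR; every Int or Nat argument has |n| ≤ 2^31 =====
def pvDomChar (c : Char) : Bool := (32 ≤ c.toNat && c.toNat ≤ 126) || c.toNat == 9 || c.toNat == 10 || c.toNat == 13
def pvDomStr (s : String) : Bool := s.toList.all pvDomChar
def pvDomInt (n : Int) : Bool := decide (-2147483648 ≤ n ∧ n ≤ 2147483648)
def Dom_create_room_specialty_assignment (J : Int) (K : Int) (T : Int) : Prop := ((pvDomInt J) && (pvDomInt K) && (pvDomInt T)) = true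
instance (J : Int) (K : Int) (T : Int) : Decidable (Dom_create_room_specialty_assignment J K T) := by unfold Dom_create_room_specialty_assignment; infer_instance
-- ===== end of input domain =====

-- B replaces A's per-cell conditional with a branch-free default fill of 0s followed by a
-- targeted second pass overwriting the four fixed assigned (room, specialty) pairs with 1.

-- ===== PORT A =====
def create_room_specialty_assignment (J : Int) (K : Int) (T : Int) : List (Int × Int × Int × Int) :=
  let d : PySem.Dict (Int × Int × Int) Int :=
    (PySem.List.pyRange 0 J 1).foldl (fun d j =>
      (PySem.List.pyRange 0 K 1).foldl (fun d k =>
        (PySem.List.pyRange 0 T 1).foldl (fun d t =>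
          if (j + 1 = 1 ∧ (k + 1 = 1 ∨ k + 1 = 2)) ∨ (j + 1 = 2 ∧ (k + 1 = 3 ∨ k + 1 = 4)) then
            d.insert (j + 1, k + 1, t + 1) 1
          else
            d.insert (j + 1, k + 1, t + 1) 0) d) d) PySem.Dict.empty
  d.items.map (fun p => (p.1.1, p.1.2.1, p.1.2.2, p.2))

-- ===== PORT B =====
def assignedPairs : List (Int × Int) := [(1, 1), (1, 2), (2, 3), (2, 4)]

def create_room_specialty_assignment_alt (J : Int) (K : Int) (T : Int) : List (Int × Int × Int × Int) :=
  let d0 : PySem.Dict (Int × Int × Int) Int :=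
    (PySem.List.pyRange 0 J 1).foldl (fun d j =>
      (PySem.List.pyRange 0 K 1).foldl (fun d k =>
        (PySem.List.pyRange 0 T 1).foldl (fun d t =>
          d.insert (j + 1, k + 1, t + 1) 0) d) d) PySem.Dict.empty
  let active := assignedPairs.filter (fun jk => decide (jk.1 ≤ J ∧ jk.2 ≤ K))
  let d : PySem.Dict (Int × Int × Int) Int :=
    if active.isEmpty then d0
    else (PySem.List.pyRange 1 (T + 1) 1).foldl (fun d t =>
      active.foldl (fun d jk => d.insert (jk.1, jk.2, t) 1) d) d0
  d.items.map (fun p => (p.1.1, p.1.2.1, p.1.2.2, p.2))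

-- ===== PRECONDITION & SPEC =====
def Spec_create_room_specialty_assignment (J : Int) (K : Int) (T : Int) (out : List (Int × Int × Int × Int)) : Prop := out = create_room_specialty_assignment_alt J K T
instance (J : Int) (K : Int) (T : Int) (out : List (Int × Int × Int × Int)) : Decidable (Spec_create_room_specialty_assignment J K T out) := by unfold Spec_create_room_specialty_assignment; infer_instance

-- ===== CLAIM (what is proved, stated in full; the proofs are below) =====
def Claim_equal_create_room_specialty_assignment : Prop := ∀ (J : Int) (K : Int) (T : Int), Dom_create_room_specialty_assignment J K T → Spec_create_room_specialty_assignment J K T (create_room_specialty_assignment J K T)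

-- ===== LEMMAS AND PROOFS =====

-- the grid keys (j+1, k+1, t+1) in insertion order
def gridKeys (J K T : Int) : List (Int × Int × Int) :=
  (PySem.List.pyRange 0 J 1).flatMap (fun j =>
    (PySem.List.pyRange 0 K 1).flatMap (fun k =>
      (PySem.List.pyRange 0 T 1).map (fun t => (j + 1, k + 1, t + 1))))

-- the keys B's second pass writes 1 to, in insertion order
def ovKeys (J K T : Int) : List (Int × Int × Int) :=
  (PySem.List.pyRange 1 (T + 1) 1).flatMap (fun t =>
    (assignedPairs.filter (fun jk => decide (jk.1 ≤ J ∧ jk.2 ≤ K))).map (fun jk => (jk.1, jk.2, t)))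

-- the value A stores at key x
def vA (x : Int × Int × Int) : Int :=
  if (x.1 = 1 ∧ (x.2.1 = 1 ∨ x.2.1 = 2)) ∨ (x.1 = 2 ∧ (x.2.1 = 3 ∨ x.2.1 = 4)) then 1 else 0

lemma mem_gridKeys {J K T : Int} {x : Int × Int × Int} :
    x ∈ gridKeys J K T ↔ 1 ≤ x.1 ∧ x.1 ≤ J ∧ 1 ≤ x.2.1 ∧ x.2.1 ≤ K ∧ 1 ≤ x.2.2 ∧ x.2.2 ≤ T := by
  obtain ⟨a, b, c⟩ := x
  simp only [gridKeys, List.mem_flatMap, List.mem_map, PySem.List.mem_pyRange_one, Prod.mk.injEq]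
  constructor
  · rintro ⟨j, hj, k, hk, t, ht, rfl, rfl, rfl⟩; omega
  · rintro h; exact ⟨a - 1, by omega, b - 1, by omega, c - 1, by omega, by omega, by omega, by omega⟩

lemma nodup_gridKeys (J K T : Int) : (gridKeys J K T).Nodup := by
  unfold gridKeys
  rw [List.nodup_flatMap]
  refine ⟨fun j _ => ?_, ?_⟩
  · rw [List.nodup_flatMap]
    refine ⟨fun k _ => (PySem.List.nodup_pyRange_one 0 T).map ?_, ?_⟩
    · intro s t h; simpa using h
    · refine (PySem.List.pairwise_lt_pyRange_one 0 K).imp ?_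
      intro k k' hlt x hx hx'
      simp only [List.mem_map] at hx hx'
      obtain ⟨t, _, rfl⟩ := hx
      obtain ⟨t', _, h⟩ := hx'
      simp only [Prod.mk.injEq] at h
      omega
  · refine (PySem.List.pairwise_lt_pyRange_one 0 J).imp ?_
    intro j j' hlt x hx hx'
    simp only [List.mem_flatMap, List.mem_map] at hx hx'
    obtain ⟨k, _, t, _, rfl⟩ := hx
    obtain ⟨k', _, t', _, h⟩ := hx'
    simp only [Prod.mk.injEq] at h
    omega

lemma mem_ovKeys {J K T : Int} {x : Int × Int × Int} :
    x ∈ ovKeys J K T ↔ (x.1, x.2.1) ∈ assignedPairs ∧ x.1 ≤ J ∧ x.2.1 ≤ K ∧ 1 ≤ x.2.2 ∧ x.2.2 ≤ T := by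
  obtain ⟨a, b, c⟩ := x
  simp only [ovKeys, assignedPairs, List.mem_flatMap, List.mem_map, List.mem_filter,
    PySem.List.mem_pyRange_one, List.mem_cons, List.not_mem_nil, or_false, Prod.mk.injEq,
    decide_eq_true_eq]
  constructor
  · rintro ⟨t, ht, jk, ⟨hmem, hle⟩, rfl, rfl, rfl⟩
    refine ⟨?_, hle.1, hle.2, by omega, by omega⟩
    rcases hmem with h | h | h | h <;> simp [h]
  · rintro ⟨hmem, hJ, hK, h1, h2⟩
    refine ⟨c, by omega, (a, b), ⟨?_, ⟨hJ, hK⟩⟩, rfl, rfl, rfl⟩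
    rcases hmem with h | h | h | h <;> simp_all

-- a triple fill loop over the grid inserting v at each (fresh) key
lemma fill_items (J K T : Int) (v : Int × Int × Int → Int) :
    ((PySem.List.pyRange 0 J 1).foldl (fun d j =>
      (PySem.List.pyRange 0 K 1).foldl (fun d k =>
        (PySem.List.pyRange 0 T 1).foldl (fun d t =>
          d.insert (j + 1, k + 1, t + 1) (v (j + 1, k + 1, t + 1))) d) d)
      (PySem.Dict.empty : PySem.Dict (Int × Int × Int) Int)).items
    = (gridKeys J K T).map (fun x => (x, v x)) := by
  have h := PySem.Dict.items_foldl_insert_fresh (l := gridKeys J K T)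
    (k := fun x => x) (v := v) (d := (PySem.Dict.empty : PySem.Dict (Int × Int × Int) Int))
    (by intro a _; simp [PySem.Dict.contains_empty])
    (by simpa [List.map_id'] using nodup_gridKeys J K T)
  rw [gridKeys] at h
  simp only [List.foldl_flatMap, List.foldl_map] at h
  simpa using h

-- inserting 1 at a list of existing keys rewrites the items in place
lemma override_loop (ks : List (Int × Int × Int)) (d : PySem.Dict (Int × Int × Int) Int)
    (h : ∀ k ∈ ks, d.contains k = true) :
    (ks.foldl (fun d k => d.insert k 1) d).items
      = d.items.map (fun p => if p.1 ∈ ks then (p.1, (1 : Int)) else p) := by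
  induction ks generalizing d with
  | nil => simp
  | cons k ks ih =>
    have hk : d.contains k = true := h k (by simp)
    have h' : ∀ k' ∈ ks, (d.insert k 1).contains k' = true := by
      intro k' hk'
      rw [PySem.Dict.contains_insert]
      simp [h k' (by simp [hk'])]
    rw [List.foldl_cons, ih _ h', PySem.Dict.items_insert_of_contains (h := hk), List.map_map]
    apply List.map_congr_left
    intro p _
    by_cases hpk : p.1 = k
    · simp [Function.comp, hpk]
    · simp only [Function.comp, beq_iff_eq, hpk, if_false, List.mem_cons]
      by_cases hpks : p.1 ∈ ks <;> simp [hpks]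

lemma ports_agree (J K T : Int) :
    create_room_specialty_assignment J K T = create_room_specialty_assignment_alt J K T := by
  simp only [create_room_specialty_assignment, create_room_specialty_assignment_alt]
  -- A's fill loop, with the branch hoisted into the inserted value
  have hfunA : ∀ j k : Int, (fun (d : PySem.Dict (Int × Int × Int) Int) (t : Int) =>
      if (j + 1 = 1 ∧ (k + 1 = 1 ∨ k + 1 = 2)) ∨ (j + 1 = 2 ∧ (k + 1 = 3 ∨ k + 1 = 4)) then
        d.insert (j + 1, k + 1, t + 1) 1
      else d.insert (j + 1, k + 1, t + 1) 0)
      = (fun d t => d.insert (j + 1, k + 1, t + 1) (vA (j + 1, k + 1, t + 1))) := by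
    intro j k
    funext d t
    simp only [vA]
    exact (apply_ite (fun y : Int => d.insert (j + 1, k + 1, t + 1) y) _ 1 0).symm
  have hA : ((PySem.List.pyRange 0 J 1).foldl (fun d j =>
      (PySem.List.pyRange 0 K 1).foldl (fun d k =>
        (PySem.List.pyRange 0 T 1).foldl (fun d t =>
          if (j + 1 = 1 ∧ (k + 1 = 1 ∨ k + 1 = 2)) ∨ (j + 1 = 2 ∧ (k + 1 = 3 ∨ k + 1 = 4)) then
            d.insert (j + 1, k + 1, t + 1) 1
          else
            d.insert (j + 1, k + 1, t + 1) 0) d) d)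
      (PySem.Dict.empty : PySem.Dict (Int × Int × Int) Int)).items
      = (gridKeys J K T).map (fun x => (x, vA x)) := by
    rw [← fill_items J K T vA]
    simp only [hfunA]
  -- B's fill loop
  have hB0 : ((PySem.List.pyRange 0 J 1).foldl (fun d j =>
      (PySem.List.pyRange 0 K 1).foldl (fun d k =>
        (PySem.List.pyRange 0 T 1).foldl (fun d t =>
          d.insert (j + 1, k + 1, t + 1) 0) d) d)
      (PySem.Dict.empty : PySem.Dict (Int × Int × Int) Int)).items
      = (gridKeys J K T).map (fun x => (x, (0 : Int))) :=
    fill_items J K T (fun _ => 0)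
  -- B's override loops flatten to one fold over ovKeys
  have hflat : ∀ d0 : PySem.Dict (Int × Int × Int) Int,
      (if (assignedPairs.filter (fun jk => decide (jk.1 ≤ J ∧ jk.2 ≤ K))).isEmpty then d0
       else (PySem.List.pyRange 1 (T + 1) 1).foldl (fun d t =>
        (assignedPairs.filter (fun jk => decide (jk.1 ≤ J ∧ jk.2 ≤ K))).foldl
          (fun d jk => d.insert (jk.1, jk.2, t) 1) d) d0)
      = (ovKeys J K T).foldl (fun d k => d.insert k 1) d0 := by
    intro d0
    cases he : (assignedPairs.filter (fun jk => decide (jk.1 ≤ J ∧ jk.2 ≤ K))).isEmpty with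
    | true =>
      rw [List.isEmpty_iff] at he
      have hnil : ovKeys J K T = [] := by
        rw [ovKeys, List.flatMap_eq_nil_iff]
        intro t _
        rw [he, List.map_nil]
      rw [hnil]
      rfl
    | false =>
      simp only [Bool.false_eq_true, if_false]
      rw [ovKeys, List.foldl_flatMap]
      simp only [List.foldl_map]
  set d0 : PySem.Dict (Int × Int × Int) Int :=
    (PySem.List.pyRange 0 J 1).foldl (fun d j =>
      (PySem.List.pyRange 0 K 1).foldl (fun d k =>
        (PySem.List.pyRange 0 T 1).foldl (fun d t =>
          d.insert (j + 1, k + 1, t + 1) 0) d) d) PySem.Dict.empty with hd0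
  have hkeys : d0.keys = gridKeys J K T := by
    have h1 : d0.keys = d0.items.map (·.1) := rfl
    rw [h1, hB0, List.map_map]
    have h2 : ((·.1 : (Int × Int × Int) × Int → Int × Int × Int) ∘ fun x => (x, (0 : Int))) = id := rfl
    rw [h2, List.map_id]
  have hcont : ∀ k ∈ ovKeys J K T, d0.contains k = true := by
    intro k hk
    rw [PySem.Dict.contains_eq_decide_mem_keys, hkeys, decide_eq_true_eq, mem_gridKeys]
    obtain ⟨hmem, hJ, hK, h1, h2⟩ := mem_ovKeys.mp hk
    simp only [assignedPairs, List.mem_cons, List.not_mem_nil, or_false, Prod.mk.injEq] at hmem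
    omega
  rw [hflat d0, override_loop _ _ hcont, hB0, hA]
  simp only [List.map_map]
  apply List.map_congr_left
  intro x hx
  have hg := mem_gridKeys.mp hx
  simp only [Function.comp_apply]
  by_cases hmem : x ∈ ovKeys J K T
  · have := mem_ovKeys.mp hmem
    simp only [assignedPairs, List.mem_cons, List.not_mem_nil, or_false, Prod.mk.injEq] at this
    simp only [hmem, if_true, vA, Prod.mk.injEq]
    refine ⟨trivial, trivial, trivial, ?_⟩
    rw [if_pos (by omega)]
  · have hnc : ¬ ((x.1 = 1 ∧ (x.2.1 = 1 ∨ x.2.1 = 2)) ∨ (x.1 = 2 ∧ (x.2.1 = 3 ∨ x.2.1 = 4))) := by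
      intro hc
      exact hmem (mem_ovKeys.mpr ⟨by
        simp only [assignedPairs, List.mem_cons, List.not_mem_nil, or_false, Prod.mk.injEq]
        omega, by omega, by omega, by omega, by omega⟩)
    simp only [hmem, if_false, vA, Prod.mk.injEq]
    refine ⟨trivial, trivial, trivial, ?_⟩
    rw [if_neg hnc]

-- ===== VERDICT (by name: the statement is the Claim_ definition above) =====
theorem create_room_specialty_assignment_spec : Claim_equal_create_room_specialty_assignment := by
  intro J K T _
  exact ports_agree J K T
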